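-- pv_equiv track=rewrite | github.com/need-singularity/sylvian-singularity | .shared/calc/elliptic_curves_perfect.py | ap_general
-- ===== SOURCE A (Python) =====
-- def ap_general(a1, a2, a3, a4, a6, p):
--     """Compute a_p for general Weierstrass y^2+a1*xy+a3*y = x^3+a2*x^2+a4*x+a6 over F_p."""
--     if p < 3:
--         return 0
--     count = 0
--     for x in range(p):
--         for y in range(p):
--             lhs = (y**2 + a1*x*y + a3*y) % p
--             rhs = (x**3 + a2*x**2 + a4*x + a6) % p
--             if lhs == rhs:
--                 count += 1
--     num_points = 1 + count  # +1 for point at infinity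
--     return p + 1 - num_points
-- ===== SOURCE B (Python) =====
-- def ap_general(a1, a2, a3, a4, a6, p):
--     """Compute a_p for general Weierstrass y^2+a1*xy+a3*y = x^3+a2*x^2+a4*x+a6 over F_p."""
--     if p < 3:
--         return 0
--     # Multiply the curve equation by 4 and complete the square:
--     #   y^2 + b*y = c (mod p)  <=>  (2*y + b)^2 = 4*c + b^2 (mod 4*p),
--     # and as y runs over 0..p-1, z = 2*y + b runs (mod 2*p) over all residues
--     # with z % 2 == b % 2, while z^2 mod 4*p depends only on z mod 2*p.
--     # So one square-count table of size O(p) answers every column x in O(1).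
--     m4 = 4 * p
--     sq = {}
--     for z in range(2 * p):
--         k = (z % 2, z * z % m4)
--         sq[k] = sq.get(k, 0) + 1
--     total = 0
--     for x in range(p):
--         b = a1 * x + a3
--         c = x * x * x + a2 * x * x + a4 * x + a6
--         total += sq.get((b % 2, (4 * c + b * b) % m4), 0)
--     return p - total
-- ===== Notes on version B (the rewrite author's own statement) =====
-- stated objective: faster
-- what changed: Replaces the p×p brute-force scan over (x,y) pairs by completing the square: one O(p) table counting z^2 mod 4p by parity of z answers each column x with a single dictionary lookup.
import Mathlib
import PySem

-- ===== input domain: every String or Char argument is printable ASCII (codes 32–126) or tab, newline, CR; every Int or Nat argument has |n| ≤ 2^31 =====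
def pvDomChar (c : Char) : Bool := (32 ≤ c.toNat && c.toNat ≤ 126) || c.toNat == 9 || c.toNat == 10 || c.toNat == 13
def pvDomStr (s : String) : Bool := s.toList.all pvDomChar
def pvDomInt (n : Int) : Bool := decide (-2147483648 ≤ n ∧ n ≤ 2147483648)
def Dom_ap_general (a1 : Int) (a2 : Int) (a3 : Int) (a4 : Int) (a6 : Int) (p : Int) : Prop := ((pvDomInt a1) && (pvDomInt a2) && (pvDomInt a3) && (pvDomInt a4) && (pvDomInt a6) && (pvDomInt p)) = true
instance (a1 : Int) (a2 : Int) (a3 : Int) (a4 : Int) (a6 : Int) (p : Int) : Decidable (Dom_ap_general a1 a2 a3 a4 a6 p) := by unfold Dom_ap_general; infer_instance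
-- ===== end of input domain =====

-- B replaces A's p×p brute-force point count by completing the square: one O(p) table
-- counting z^2 mod 4p per parity of z answers each column x with a single dict lookup.

-- ===== PORT A =====
def ap_general (a1 : Int) (a2 : Int) (a3 : Int) (a4 : Int) (a6 : Int) (p : Int) : Int :=
  if p < 3 then 0
  else
    let count := (PySem.List.pyRange 0 p 1).foldl (fun acc x =>
      (PySem.List.pyRange 0 p 1).foldl (fun acc y =>
        if PySem.Int.mod (y^2 + a1*x*y + a3*y) p = PySem.Int.mod (x^3 + a2*x^2 + a4*x + a6) p
        then acc + 1 else acc) acc) 0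
    let numPoints := 1 + count
    p + 1 - numPoints

-- ===== PORT B =====
def ap_general_alt (a1 : Int) (a2 : Int) (a3 : Int) (a4 : Int) (a6 : Int) (p : Int) : Int :=
  if p < 3 then 0
  else
    let m4 := 4 * p
    let sq := (PySem.List.pyRange 0 (2*p) 1).foldl (fun d z =>
      d.insert ((PySem.Int.mod z 2, PySem.Int.mod (z*z) m4) : Int × Int)
        (d.getD ((PySem.Int.mod z 2, PySem.Int.mod (z*z) m4) : Int × Int) 0 + 1))
      (PySem.Dict.empty : PySem.Dict (Int × Int) Int)
    let total := (PySem.List.pyRange 0 p 1).foldl (fun t x =>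
      t + sq.getD (PySem.Int.mod (a1*x + a3) 2,
            PySem.Int.mod (4*(x*x*x + a2*x*x + a4*x + a6) + (a1*x + a3)*(a1*x + a3)) m4) 0) 0
    p - total

-- ===== PRECONDITION & SPEC =====
def Spec_ap_general (a1 : Int) (a2 : Int) (a3 : Int) (a4 : Int) (a6 : Int) (p : Int) (out : Int) : Prop := out = ap_general_alt a1 a2 a3 a4 a6 p
instance (a1 : Int) (a2 : Int) (a3 : Int) (a4 : Int) (a6 : Int) (p : Int) (out : Int) : Decidable (Spec_ap_general a1 a2 a3 a4 a6 p out) := by unfold Spec_ap_general; infer_instance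

-- ===== CLAIM (what is proved, stated in full; the proofs are below) =====
def Claim_equal_ap_general : Prop := ∀ (a1 : Int) (a2 : Int) (a3 : Int) (a4 : Int) (a6 : Int) (p : Int), Dom_ap_general a1 a2 a3 a4 a6 p → Spec_ap_general a1 a2 a3 a4 a6 p (ap_general a1 a2 a3 a4 a6 p)

-- ===== LEMMAS AND PROOFS =====

-- a % n = b % n is divisibility of the difference
lemma pvEmodCongrIff (a b n : Int) : a % n = b % n ↔ n ∣ a - b := by
  rw [Int.emod_eq_emod_iff_emod_sub_eq_zero]
  exact ⟨Int.dvd_of_emod_eq_zero, Int.emod_eq_zero_of_dvd⟩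

-- congruence mod 2p of the base gives congruence mod 4p of the square
lemma pvSqCongr (pn z w : Int) (h : z % (2*pn) = w % (2*pn)) :
    (z*z) % (4*pn) = (w*w) % (4*pn) := by
  rw [pvEmodCongrIff] at h ⊢
  obtain ⟨t, ht⟩ := h
  exact ⟨pn*t*t + t*w, by linear_combination (z + w + 2*pn*t) * ht⟩

-- completing the square: y^2+b*y ≡ c (mod p)  ⟺  (b+2y)^2 ≡ 4c+b^2 (mod 4p)
lemma pvQuadIff (pn y b c : Int) :
    ((b+2*y)*(b+2*y)) % (4*pn) = (4*c + b*b) % (4*pn) ↔ (y^2 + b*y) % pn = c % pn := by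
  rw [pvEmodCongrIff, pvEmodCongrIff,
      show (b+2*y)*(b+2*y) - (4*c + b*b) = 4*((y^2 + b*y) - c) from by ring]
  exact mul_dvd_mul_iff_left (by norm_num : (4:Int) ≠ 0)

lemma pvParityShift (pn b y : Int) : ((b + 2*y) % (2*pn)) % 2 = b % 2 := by
  rw [Int.emod_emod_of_dvd _ ⟨pn, by ring⟩, Int.add_mul_emod_self_left]

-- the central count: solutions y of y^2+b*y ≡ c (mod p) in [0,p) correspond bijectively
-- (via z = (b+2y) mod 2p) to z in [0,2p) with z ≡ b (mod 2) and z^2 ≡ 4c+b^2 (mod 4p)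
lemma pvCountCore (p b c : Int) (hp : 0 < p) :
    ((Finset.range p.toNat).filter (fun y : Nat => ((y:Int)^2 + b*(y:Int)) % p = c % p)).card
  = ((Finset.range (2*p).toNat).filter (fun z : Nat =>
        (z:Int) % 2 = b % 2 ∧ ((z:Int)*(z:Int)) % (4*p) = (4*c + b*b) % (4*p))).card := by
  apply Finset.card_bij' (fun (y : Nat) (_ : y ∈ _) => ((b + 2*(y:Int)) % (2*p)).toNat)
      (fun (z : Nat) (_ : z ∈ _) => ((((z:Int) - b)/2) % p).toNat)
  · -- hi : maps into the target filter
    intro y hy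
    rw [Finset.mem_filter, Finset.mem_range] at hy ⊢
    have hnn : 0 ≤ (b + 2*(y:Int)) % (2*p) := Int.emod_nonneg _ (by omega)
    have hlt : (b + 2*(y:Int)) % (2*p) < 2*p := Int.emod_lt_of_pos _ (by omega)
    have hc : (((b + 2*(y:Int)) % (2*p)).toNat : Int) = (b + 2*(y:Int)) % (2*p) :=
      Int.toNat_of_nonneg hnn
    refine ⟨by omega, ?_, ?_⟩
    · rw [hc]; exact pvParityShift p b y
    · rw [hc]
      have hsq : (((b + 2*(y:Int)) % (2*p)) * ((b + 2*(y:Int)) % (2*p))) % (4*p)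
          = ((b + 2*(y:Int)) * (b + 2*(y:Int))) % (4*p) :=
        pvSqCongr p _ _ (Int.emod_emod_of_dvd _ dvd_rfl)
      rw [hsq]
      exact (pvQuadIff p y b c).mpr hy.2
  · -- hj : maps back into the source filter
    intro z hz
    rw [Finset.mem_filter, Finset.mem_range] at hz ⊢
    obtain ⟨hzlt, hpar, hsq⟩ := hz
    have hnn : 0 ≤ ((z:Int) - b)/2 % p := Int.emod_nonneg _ (by omega)
    have hlt : ((z:Int) - b)/2 % p < p := Int.emod_lt_of_pos _ hp
    have hc : (((((z:Int) - b)/2) % p).toNat : Int) = (((z:Int) - b)/2) % p :=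
      Int.toNat_of_nonneg hnn
    have hdvd : (2:Int) ∣ (z:Int) - b := (pvEmodCongrIff _ _ _).mp hpar
    have hu : 2 * (((z:Int) - b)/2) = (z:Int) - b := Int.mul_ediv_cancel' hdvd
    refine ⟨by omega, ?_⟩
    rw [hc]
    set u : Int := ((z:Int) - b)/2 with hudef
    have hshift : (b + 2*(u % p)) % (2*p) = (z:Int) % (2*p) := by
      have hd := Int.emod_def u p
      rw [show b + 2*(u % p) = (b + 2*u) - (2*p)*(u/p) from by linear_combination 2 * hd,
          Int.sub_mul_emod_self_left]
      congr 1
      omega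
    apply (pvQuadIff p (u % p) b c).mp
    rw [pvSqCongr p (b + 2*(u % p)) (z:Int) hshift]
    exact hsq
  · -- left inverse
    intro y hy
    rw [Finset.mem_filter, Finset.mem_range] at hy
    have hnn : 0 ≤ (b + 2*(y:Int)) % (2*p) := Int.emod_nonneg _ (by omega)
    have hc : (((b + 2*(y:Int)) % (2*p)).toNat : Int) = (b + 2*(y:Int)) % (2*p) :=
      Int.toNat_of_nonneg hnn
    have hdef := Int.emod_def (b + 2*(y:Int)) (2*p)
    set t : Int := (b + 2*(y:Int)) / (2*p) with htdef
    have hz : ((b + 2*(y:Int)) % (2*p) - b) / 2 = (y:Int) - p*t := by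
      rw [show (b + 2*(y:Int)) % (2*p) - b = 2*((y:Int) - p*t) from by linear_combination hdef]
      exact Int.mul_ediv_cancel_left _ (by norm_num)
    have hfin : (((b + 2*(y:Int)) % (2*p)).toNat - b) / 2 % p = (y:Int) := by
      rw [hc, hz, Int.sub_mul_emod_self_left, Int.emod_eq_of_lt (by omega) (by omega)]
    omega
  · -- right inverse
    intro z hz
    rw [Finset.mem_filter, Finset.mem_range] at hz
    obtain ⟨hzlt, hpar, _⟩ := hz
    have hdvd : (2:Int) ∣ (z:Int) - b := (pvEmodCongrIff _ _ _).mp hpar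
    have hu : 2 * (((z:Int) - b)/2) = (z:Int) - b := Int.mul_ediv_cancel' hdvd
    have hnn : 0 ≤ ((z:Int) - b)/2 % p := Int.emod_nonneg _ (by omega)
    have hc : (((((z:Int) - b)/2) % p).toNat : Int) = (((z:Int) - b)/2) % p :=
      Int.toNat_of_nonneg hnn
    have hd := Int.emod_def (((z:Int) - b)/2) p
    have hz2 : (b + 2*((((z:Int) - b)/2) % p)) % (2*p) = (z:Int) := by
      rw [show b + 2*((((z:Int) - b)/2) % p)
            = (b + 2*(((z:Int) - b)/2)) - (2*p)*((((z:Int) - b)/2)/p) from by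
              linear_combination 2 * hd,
          Int.sub_mul_emod_self_left]
      have : b + 2*(((z:Int) - b)/2) = (z:Int) := by omega
      rw [this, Int.emod_eq_of_lt (by omega) (by omega)]
    rw [hc]
    omega

lemma pvCountPFinset (n : Nat) (q : Nat → Prop) [DecidablePred q] :
    (List.range n).countP (fun k => decide (q k)) = ((Finset.range n).filter q).card := by
  simp [List.countP_eq_length_filter, Finset.filter, Finset.range, Finset.card,
    Multiset.range, Multiset.filter_coe, Multiset.coe_card]

-- countP over a Python range as a Finset filter card
lemma pvCountPRange (n : Int) (P : Int → Prop) [DecidablePred P] :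
    (PySem.List.pyRange 0 n 1).countP (fun x => decide (P x))
  = ((Finset.range n.toNat).filter (fun k : Nat => P (k:Int))).card := by
  rw [PySem.List.pyRange_one, List.countP_map]
  have hco : ((fun x => decide (P x)) ∘ fun k : Nat => (0:Int) + (k:Int))
      = fun k : Nat => decide (P (k:Int)) := by
    funext k; simp
  rw [hco, show ((n:Int) - 0).toNat = n.toNat from by omega]
  exact pvCountPFinset n.toNat (fun k => P (k:Int))

-- per-column equality: A's inner y-loop count equals B's table lookup
lemma pvColumn (p b c : Int) (hp : 0 < p) :
    (((PySem.List.pyRange 0 p 1).countP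
        (fun y => decide (PySem.Int.mod (y^2 + b*y) p = PySem.Int.mod c p))) : Int)
  = (PySem.Dict.counter ((PySem.List.pyRange 0 (2*p) 1).map
        (fun z => ((PySem.Int.mod z 2, PySem.Int.mod (z*z) (4*p)) : Int × Int)))).getD
      (PySem.Int.mod b 2, PySem.Int.mod (4*c + b*b) (4*p)) 0 := by
  rw [PySem.Dict.getD_counter, List.count_eq_countP, List.countP_map]
  have hmodp : ∀ a : Int, PySem.Int.mod a p = a % p := fun a => PySem.Int.mod_eq_emod_of_pos hp
  have hmod4 : ∀ a : Int, PySem.Int.mod a (4*p) = a % (4*p) :=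
    fun a => PySem.Int.mod_eq_emod_of_pos (by omega)
  have hL : (PySem.List.pyRange 0 p 1).countP
        (fun y => decide (PySem.Int.mod (y^2 + b*y) p = PySem.Int.mod c p))
      = (PySem.List.pyRange 0 p 1).countP
        (fun y => decide ((y^2 + b*y) % p = c % p)) := by
    apply List.countP_congr; intro y _
    rw [Bool.eq_iff_iff]
    simp [hmodp]
  have hR : (PySem.List.pyRange 0 (2*p) 1).countP
        ((fun k => k == ((PySem.Int.mod b 2, PySem.Int.mod (4*c + b*b) (4*p)) : Int × Int)) ∘
          (fun z => ((PySem.Int.mod z 2, PySem.Int.mod (z*z) (4*p)) : Int × Int)))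
      = (PySem.List.pyRange 0 (2*p) 1).countP
        (fun z => decide (z % 2 = b % 2 ∧ (z*z) % (4*p) = (4*c + b*b) % (4*p))) := by
    apply List.countP_congr; intro z _
    rw [Bool.eq_iff_iff]
    simp [hmod4, Prod.ext_iff]
  rw [hL, hR, pvCountPRange p (fun y => (y^2 + b*y) % p = c % p),
      pvCountPRange (2*p) (fun z => z % 2 = b % 2 ∧ (z*z) % (4*p) = (4*c + b*b) % (4*p))]
  exact_mod_cast pvCountCore p b c hp

-- ===== VERDICT (by name: the statement is the Claim_ definition above) =====
theorem ap_general_spec : Claim_equal_ap_general := by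
  intro a1 a2 a3 a4 a6 p _
  unfold Spec_ap_general ap_general ap_general_alt
  by_cases hp3 : p < 3
  · simp [hp3]
  · simp only [if_neg hp3]
    have hp : (0:Int) < p := by omega
    -- A's nested loops: inner loop is a countP, outer loop a sum
    have hA : (PySem.List.pyRange 0 p 1).foldl (fun acc x =>
        (PySem.List.pyRange 0 p 1).foldl (fun acc y =>
          if PySem.Int.mod (y^2 + a1*x*y + a3*y) p = PySem.Int.mod (x^3 + a2*x^2 + a4*x + a6) p
          then acc + 1 else acc) acc) 0
      = ((PySem.List.pyRange 0 p 1).map (fun x =>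
          (((PySem.List.pyRange 0 p 1).countP (fun y =>
            decide (PySem.Int.mod (y^2 + a1*x*y + a3*y) p
              = PySem.Int.mod (x^3 + a2*x^2 + a4*x + a6) p))) : Int))).sum := by
      have h1 : (fun (acc x : Int) =>
          (PySem.List.pyRange 0 p 1).foldl (fun acc y =>
            if PySem.Int.mod (y^2 + a1*x*y + a3*y) p
                = PySem.Int.mod (x^3 + a2*x^2 + a4*x + a6) p
            then acc + 1 else acc) acc)
        = fun (acc x : Int) => acc +
            (((PySem.List.pyRange 0 p 1).countP (fun y =>
              decide (PySem.Int.mod (y^2 + a1*x*y + a3*y) p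
                = PySem.Int.mod (x^3 + a2*x^2 + a4*x + a6) p))) : Int) := by
        funext acc x
        rw [PySem.List.foldl_ite_add_one]
      rw [h1, PySem.List.foldl_add, zero_add]
    -- B's dict loop is a counter over the mapped keys
    have hdict : (PySem.List.pyRange 0 (2*p) 1).foldl (fun d z =>
        d.insert ((PySem.Int.mod z 2, PySem.Int.mod (z*z) (4*p)) : Int × Int)
          (d.getD ((PySem.Int.mod z 2, PySem.Int.mod (z*z) (4*p)) : Int × Int) 0 + 1))
        (PySem.Dict.empty : PySem.Dict (Int × Int) Int)
      = PySem.Dict.counter ((PySem.List.pyRange 0 (2*p) 1).map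
          (fun z => ((PySem.Int.mod z 2, PySem.Int.mod (z*z) (4*p)) : Int × Int))) := by
      rw [← PySem.Dict.foldl_insert_getD_add_one_eq_counter]
      simp [List.foldl_map]
    -- B's total loop is a sum of lookups
    have hB : ∀ sq : PySem.Dict (Int × Int) Int,
        (PySem.List.pyRange 0 p 1).foldl (fun t x =>
          t + sq.getD (PySem.Int.mod (a1*x + a3) 2,
                PySem.Int.mod (4*(x*x*x + a2*x*x + a4*x + a6) + (a1*x + a3)*(a1*x + a3)) (4*p)) 0) 0
      = ((PySem.List.pyRange 0 p 1).map (fun x =>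
          sq.getD (PySem.Int.mod (a1*x + a3) 2,
            PySem.Int.mod (4*(x*x*x + a2*x*x + a4*x + a6) + (a1*x + a3)*(a1*x + a3)) (4*p)) 0)).sum := by
      intro sq
      rw [PySem.List.foldl_add, zero_add]
    simp only [hdict]
    rw [hA, hB]
    -- the per-column equality makes the two mapped functions identical
    have hfun : (fun x =>
          (((PySem.List.pyRange 0 p 1).countP (fun y =>
            decide (PySem.Int.mod (y^2 + a1*x*y + a3*y) p
              = PySem.Int.mod (x^3 + a2*x^2 + a4*x + a6) p))) : Int))
        = fun x => (PySem.Dict.counter ((PySem.List.pyRange 0 (2*p) 1).map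
            (fun z => ((PySem.Int.mod z 2, PySem.Int.mod (z*z) (4*p)) : Int × Int)))).getD
            (PySem.Int.mod (a1*x + a3) 2,
             PySem.Int.mod (4*(x*x*x + a2*x*x + a4*x + a6) + (a1*x + a3)*(a1*x + a3)) (4*p)) 0 := by
      funext x
      have e1 : ∀ y : Int, y^2 + a1*x*y + a3*y = y^2 + (a1*x + a3)*y := fun y => by ring
      have e2 : x^3 + a2*x^2 + a4*x + a6 = x*x*x + a2*x*x + a4*x + a6 := by ring
      simp only [e1, e2]
      exact pvColumn p (a1*x + a3) (x*x*x + a2*x*x + a4*x + a6) hp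
    rw [hfun]
    ring
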